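-- pv_equiv track=rewrite | github.com/rciric/niwaves | niwaves/functions/lag.py | tmask_blocks
-- ===== SOURCE A (Python) =====
-- def tmask_blocks(tmask, min_block=0, sample_time=1):
--     """
--     Return a list containing the indices of each valid block of a temporal
--     mask.
--
--     Parameters
--     ----------
--     tmask
--         The temporal mask, in which 1 denotes valid observations and 0
--         denotes invalid or missing observations.
--     min_block
--         The minimum length of a block, in the same units as sample_time.
--         If sample_time is not set explicitly, then this is measured in
--         samples. If min_block is not set, then all blocks of valid data
--         will be returned.
--     sample_time
--         The sampling interval of the temporal mask.
--
--     Outputs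
--     -------
--     blocks: list
--         A list whose length equals the number of valid blocks in the
--         temporal mask and whose entries are lists of the indices in each
--         block.
--     """
--     def _check_block_length(block, blocks, min_block, sample_time):
--         if len(block) * sample_time > min_block:
--             blocks.append(block)
--
--     blocks = []
--     block = []
--     for i, t in enumerate(tmask):
--         if t:
--             block.append(i)
--         else:
--             _check_block_length(block, blocks, min_block, sample_time)
--             block = []
--     _check_block_length(block, blocks, min_block, sample_time)
--     return blocks
-- ===== SOURCE B (Python) =====
-- def tmask_blocks(tmask, min_block=0, sample_time=1):
--     tmask = list(tmask)
--     n = len(tmask)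
--     zeros = [i for i, t in enumerate(tmask) if not t]
--     bounds = [-1] + zeros + [n]
--     out = []
--     for a, b in zip(bounds, bounds[1:]):
--         block = list(range(a + 1, b))
--         if len(block) * sample_time > min_block:
--             out.append(block)
--     return out
-- ===== Notes on version B (the rewrite author's own statement) =====
-- stated objective: alternative
-- what changed: Replaces the accumulate-and-flush single pass over elements by a two-phase 'find the separator indices, then emit the spans between consecutive separators as ranges' decomposition.
import Mathlib
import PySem

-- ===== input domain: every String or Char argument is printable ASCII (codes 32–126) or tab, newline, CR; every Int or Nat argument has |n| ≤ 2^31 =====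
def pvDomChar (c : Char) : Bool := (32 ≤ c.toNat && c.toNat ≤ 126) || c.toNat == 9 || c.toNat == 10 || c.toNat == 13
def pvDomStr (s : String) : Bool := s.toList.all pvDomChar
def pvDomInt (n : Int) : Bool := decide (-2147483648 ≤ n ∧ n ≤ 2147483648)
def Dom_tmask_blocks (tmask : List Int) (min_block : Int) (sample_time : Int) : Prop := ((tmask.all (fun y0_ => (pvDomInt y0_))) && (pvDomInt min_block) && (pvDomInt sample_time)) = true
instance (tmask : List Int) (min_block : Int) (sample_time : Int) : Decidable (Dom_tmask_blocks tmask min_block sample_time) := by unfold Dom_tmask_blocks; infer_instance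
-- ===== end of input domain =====

-- B replaces A's accumulate-and-flush single pass by a two-phase "collect the separator
-- indices, then emit the ranges between consecutive separators" decomposition (alternative,
-- same cost; equivalence of the return value is proved below).

-- ===== PORT A =====
-- A: single pass; grow the current block on truthy entries, flush it (append iff
-- len(block)*sample_time > min_block) on falsy entries and once more at the end.
def tmask_blocks (tmask : List Int) (min_block : Int) (sample_time : Int) : List (List Int) :=
  let s := (PySem.List.enumerate tmask 0).foldl
    (fun (st : List (List Int) × List Int) it =>
      if it.2 ≠ 0 then (st.1, st.2 ++ [it.1])
      else (if (st.2.length : Int) * sample_time > min_block then st.1 ++ [st.2] else st.1,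
            ([] : List Int)))
    ([], [])
  if (s.2.length : Int) * sample_time > min_block then s.1 ++ [s.2] else s.1

-- ===== PORT B =====
-- B: indices of falsy entries are the separators; the candidate blocks are the open
-- ranges between consecutive elements of [-1] + zeros + [len(tmask)].
def tmask_blocks_alt (tmask : List Int) (min_block : Int) (sample_time : Int) : List (List Int) :=
  let n : Int := tmask.length
  let zeros := (PySem.List.enumerate tmask 0).filterMap
    (fun it => if it.2 = 0 then some it.1 else none)
  let bounds := [(-1 : Int)] ++ zeros ++ [n]
  (bounds.zip bounds.tail).foldl
    (fun out p =>
      let block := PySem.List.pyRange (p.1 + 1) p.2 1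
      if (block.length : Int) * sample_time > min_block then out ++ [block] else out)
    []

-- ===== PRECONDITION & SPEC =====
def Spec_tmask_blocks (tmask : List Int) (min_block : Int) (sample_time : Int) (out : List (List Int)) : Prop := out = tmask_blocks_alt tmask min_block sample_time
instance (tmask : List Int) (min_block : Int) (sample_time : Int) (out : List (List Int)) : Decidable (Spec_tmask_blocks tmask min_block sample_time out) := by unfold Spec_tmask_blocks; infer_instance

-- ===== CLAIM (what is proved, stated in full; the proofs are below) =====
def Claim_equal_tmask_blocks : Prop := ∀ (tmask : List Int) (min_block : Int) (sample_time : Int), Dom_tmask_blocks tmask min_block sample_time → Spec_tmask_blocks tmask min_block sample_time (tmask_blocks tmask min_block sample_time)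

-- ===== LEMMAS AND PROOFS =====

-- The maximal runs of indices of truthy entries of xs (indexed from i), in order,
-- INCLUDING the empty runs A's flushes produce: one run per falsy entry plus the final one.
def pvRuns (i : Int) : List Int → List (List Int)
  | [] => [[]]
  | x :: xs => if x = 0 then [] :: pvRuns (i + 1) xs else pvConsHead i (pvRuns (i + 1) xs)
where
  pvConsHead (i : Int) : List (List Int) → List (List Int)
    | [] => [[i]]
    | r :: rs => (i :: r) :: rs

def pvPrep (b : List Int) : List (List Int) → List (List Int)
  | [] => [b]
  | r :: rs => (b ++ r) :: rs

def pvSpans (a : Int) : List Int → List (List Int)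
  | [] => []
  | b :: l => PySem.List.pyRange (a + 1) b 1 :: pvSpans b l

lemma pvRuns_ne_nil (i : Int) (xs : List Int) : pvRuns i xs ≠ [] := by
  cases xs with
  | nil => simp [pvRuns]
  | cons x xs =>
    simp only [pvRuns]
    split
    · simp
    · cases pvRuns (i + 1) xs <;> simp [pvRuns.pvConsHead]

lemma pvPrep_nil_of_ne_nil {l : List (List Int)} (h : l ≠ []) : pvPrep [] l = l := by
  cases l with
  | nil => exact absurd rfl h
  | cons r rs => simp [pvPrep]

lemma pvPrep_consHead (b : List Int) (i : Int) (l : List (List Int)) :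
    pvPrep b (pvRuns.pvConsHead i l) = pvPrep (b ++ [i]) l := by
  cases l <;> simp [pvPrep, pvRuns.pvConsHead]

lemma pvA_fold (mb st : Int) (xs : List Int) : ∀ (i : Int) (bs : List (List Int)) (b : List Int),
    (let s := (PySem.List.enumerate xs i).foldl
      (fun (st' : List (List Int) × List Int) it =>
        if it.2 ≠ 0 then (st'.1, st'.2 ++ [it.1])
        else (if (st'.2.length : Int) * st > mb then st'.1 ++ [st'.2] else st'.1,
              ([] : List Int)))
      (bs, b)
     if (s.2.length : Int) * st > mb then s.1 ++ [s.2] else s.1)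
    = bs ++ (pvPrep b (pvRuns i xs)).filter (fun r => decide ((r.length : Int) * st > mb)) := by
  induction xs with
  | nil =>
    intro i bs b
    simp only [PySem.List.enumerate_nil, List.foldl_nil, pvRuns, pvPrep]
    split_ifs with h <;> simp [h]
  | cons x xs ih =>
    intro i bs b
    rw [PySem.List.enumerate_cons, List.foldl_cons]
    by_cases hx : x = 0
    · simp only [hx, ne_eq, not_true_eq_false, if_false]
      rw [ih (i + 1), pvPrep_nil_of_ne_nil (pvRuns_ne_nil (i + 1) xs)]
      simp only [pvRuns, pvPrep]
      split_ifs with h <;> simp [h]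
    · simp only [ne_eq, hx, not_false_eq_true, if_true]
      rw [ih (i + 1)]
      simp only [pvRuns, if_neg hx, pvPrep_consHead]

lemma pvZip_map (l : List Int) : ∀ (a : Int),
    ((a :: l).zip (a :: l).tail).map (fun p : Int × Int => PySem.List.pyRange (p.1 + 1) p.2 1)
      = pvSpans a l := by
  induction l with
  | nil => intro a; simp [pvSpans]
  | cons b l ih => intro a; simpa [pvSpans] using ih b

lemma pvZeros_ge (xs : List Int) : ∀ (i z : Int),
    z ∈ (PySem.List.enumerate xs i).filterMap
        (fun it : Int × Int => if it.2 = 0 then some it.1 else none) → i ≤ z := by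
  induction xs with
  | nil => intro i z h; simp [PySem.List.enumerate_nil] at h
  | cons x xs ih =>
    intro i z h
    rw [PySem.List.enumerate_cons, List.filterMap_cons] at h
    have step : z ∈ (PySem.List.enumerate xs (i + 1)).filterMap
        (fun it : Int × Int => if it.2 = 0 then some it.1 else none) → i ≤ z := by
      intro hm; have := ih (i + 1) z hm; omega
    by_cases hx : x = 0
    · simp only [hx] at h
      rcases List.mem_cons.mp h with h | h
      · omega
      · exact step h
    · simp only [if_neg hx] at h
      exact step h

lemma pvSpans_step {i z : Int} (hz : i < z) (l : List Int) :
    pvSpans (i - 1) (z :: l) = pvRuns.pvConsHead i (pvSpans i (z :: l)) := by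
  simp only [pvSpans, pvRuns.pvConsHead]
  rw [show i - 1 + 1 = i by ring, PySem.List.pyRange_one_cons hz]

lemma pvSpans_eq_runs (xs : List Int) : ∀ (i : Int),
    pvSpans (i - 1)
      ((PySem.List.enumerate xs i).filterMap
        (fun it : Int × Int => if it.2 = 0 then some it.1 else none) ++ [i + xs.length])
    = pvRuns i xs := by
  induction xs with
  | nil =>
    intro i
    simp [PySem.List.enumerate_nil, pvSpans, pvRuns]
  | cons x xs ih =>
    intro i
    rw [PySem.List.enumerate_cons, List.filterMap_cons]
    have hn : i + ((x :: xs).length : Int) = (i + 1) + (xs.length : Int) := by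
      simp only [List.length_cons]; push_cast; ring
    by_cases hx : x = 0
    · subst hx
      simp only [reduceIte, List.cons_append, pvSpans]
      rw [show i - 1 + 1 = i by ring, PySem.List.pyRange_one_eq_nil (le_refl i), hn]
      have h2 := ih (i + 1)
      rw [show (i + 1) - 1 = i by ring] at h2
      rw [h2]
      simp [pvRuns]
    · simp only [if_neg hx]
      rw [hn]
      have h2 := ih (i + 1)
      rw [show (i + 1) - 1 = i by ring] at h2
      cases he : (PySem.List.enumerate xs (i + 1)).filterMap
          (fun it : Int × Int => if it.2 = 0 then some it.1 else none) ++ [(i + 1) + (xs.length : Int)] with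
      | nil => simp at he
      | cons z l' =>
        have hz : i < z := by
          cases hzl : (PySem.List.enumerate xs (i + 1)).filterMap
              (fun it : Int × Int => if it.2 = 0 then some it.1 else none) with
          | nil =>
            rw [hzl] at he; simp only [List.nil_append, List.cons.injEq] at he
            have : (0:Int) ≤ (xs.length : Int) := by positivity
            omega
          | cons z0 l0 =>
            rw [hzl] at he
            simp only [List.cons_append, List.cons.injEq] at he
            have hz0 : i + 1 ≤ z0 := pvZeros_ge xs (i + 1) z0 (by rw [hzl]; exact List.mem_cons_self)
            omega
        rw [pvSpans_step hz l', ← he, h2]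
        simp [pvRuns, hx]

lemma pvB_fold (mb st : Int) (l : List (Int × Int)) : ∀ (acc : List (List Int)),
    l.foldl (fun out p =>
        let block := PySem.List.pyRange (p.1 + 1) p.2 1
        if (block.length : Int) * st > mb then out ++ [block] else out) acc
    = acc ++ ((l.map (fun p : Int × Int => PySem.List.pyRange (p.1 + 1) p.2 1)).filter
        (fun r => decide ((r.length : Int) * st > mb))) := by
  induction l with
  | nil => intro acc; simp
  | cons p l ih =>
    intro acc
    simp only [List.foldl_cons, List.map_cons, List.filter_cons, decide_eq_true_eq]
    rw [ih]
    split_ifs with h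
    · simp
    · simp

def pvBounds (tmask : List Int) : List Int :=
  (-1) :: (((PySem.List.enumerate tmask 0).filterMap
    (fun it : Int × Int => if it.2 = 0 then some it.1 else none)) ++ [(tmask.length : Int)])

-- ===== VERDICT (by name: the statement is the Claim_ definition above) =====
theorem tmask_blocks_spec : Claim_equal_tmask_blocks := by
  intro tmask mb st _
  unfold Spec_tmask_blocks
  have hA : tmask_blocks tmask mb st
      = [] ++ (pvPrep [] (pvRuns 0 tmask)).filter
          (fun r => decide ((r.length : Int) * st > mb)) :=
    pvA_fold mb st tmask 0 [] []
  have hB : tmask_blocks_alt tmask mb st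
      = [] ++ ((((pvBounds tmask).zip (pvBounds tmask).tail).map
          (fun p : Int × Int => PySem.List.pyRange (p.1 + 1) p.2 1)).filter
          (fun r => decide ((r.length : Int) * st > mb))) :=
    pvB_fold mb st _ []
  rw [hA, hB]
  simp only [pvBounds]
  rw [pvZip_map]
  have h3 := pvSpans_eq_runs tmask 0
  norm_num at h3
  rw [h3, pvPrep_nil_of_ne_nil (pvRuns_ne_nil 0 tmask)]
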